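-- pv_equiv track=rewrite | github.com/Abhilash-du/daily-coding-challenges | DataStructures/Arrays_and_Maths/AlternatingSubarrays.py | solve
-- ===== SOURCE A (Python) =====
-- def solve(A, B):
--     x = 2 * B + 1  # actual length of each sub-array
--     n = len(A)
--     final_arr = []
--     for start in range(0, n - x + 1):  # starting index
--         expected_val = A[start]
--         append_flag = True
--         for i in range(start, start + x):  # going through each sub-array
--             if A[i] == expected_val:
--                 expected_val = expected_val ^ 1
--             else:
--                 append_flag = False
--                 break
--         if append_flag:
--             final_arr.append(start + B)  # B will always be mid value, keep on increasing as per start index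
--     return final_arr
-- ===== SOURCE B (Python) =====
-- def solve(A, B):
--     x = 2 * B + 1
--     n = len(A)
--     # alt[i] = length of the longest xor-alternating chain starting at i
--     alt = [1] * n
--     for i in range(n - 2, -1, -1):
--         alt[i] = alt[i + 1] + 1 if A[i + 1] == A[i] ^ 1 else 1
--     return [s + B for s in range(n - x + 1) if alt[s] >= x]
-- ===== Notes on version B (the rewrite author's own statement) =====
-- stated objective: alternative
-- what changed: B precomputes in one right-to-left pass the length of the xor-alternating run starting at each index, then validates each window of length 2B+1 by a single table lookup instead of A's inner rescan of the window with early break.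
import Mathlib
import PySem

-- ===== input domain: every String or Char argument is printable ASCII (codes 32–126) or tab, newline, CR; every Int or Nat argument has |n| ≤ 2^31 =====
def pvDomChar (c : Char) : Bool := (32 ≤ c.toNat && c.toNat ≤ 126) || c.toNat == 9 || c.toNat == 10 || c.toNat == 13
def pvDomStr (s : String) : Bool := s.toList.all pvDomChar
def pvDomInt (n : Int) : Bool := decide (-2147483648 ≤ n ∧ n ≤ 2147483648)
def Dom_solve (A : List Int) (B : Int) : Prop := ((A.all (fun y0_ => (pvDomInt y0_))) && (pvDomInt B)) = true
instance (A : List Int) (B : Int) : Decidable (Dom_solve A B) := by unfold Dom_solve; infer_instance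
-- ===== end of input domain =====

-- B replaces A's per-window rescan (with early break) by a one-pass table of
-- alternating-run lengths plus a lookup per window; objective: alternative.


-- ===== PORT A =====
-- Python `v ^ 1` (xor with 1) flips bit 0: exact for all ints, negatives included.
def pyXor1 (v : Int) : Int := if v % 2 == 0 then v + 1 else v - 1

-- one step of A's inner `for i in range(start, start+x)` loop; the Bool is the
-- append_flag, once false the state is frozen (Python's `break`)
def solveStep (A : List Int) (st : Int × Bool) (i : Int) : Int × Bool :=
  if st.2 then
    if PySem.List.pyGetD A i 0 = st.1 then (pyXor1 st.1, st.2) else (st.1, false)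
  else st

-- A's inner loop: expected_val starts at A[start], returns append_flag
def solveInner (A : List Int) (start x : Int) : Bool :=
  ((PySem.List.pyRange start (start + x) 1).foldl (solveStep A)
    (PySem.List.pyGetD A start 0, true)).2

def solve (A : List Int) (B : Int) : List Int :=
  let x := 2 * B + 1
  let n : Int := A.length
  (PySem.List.pyRange 0 (n - x + 1) 1).foldl
    (fun acc start => if solveInner A start x then acc ++ [start + B] else acc) []

-- ===== PORT B =====
-- alt table built right-to-left: alt[i] = alt[i+1]+1 if A[i+1] == A[i]^1 else 1
def buildAlt : List Int → List Int
  | [] => []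
  | [_] => [1]
  | a :: b :: rest =>
      let t := buildAlt (b :: rest)
      (if b = pyXor1 a then t.headI + 1 else 1) :: t

def solve_alt (A : List Int) (B : Int) : List Int :=
  let x := 2 * B + 1
  let n : Int := A.length
  let alt := buildAlt A
  ((PySem.List.pyRange 0 (n - x + 1) 1).filter
      (fun s => decide (x ≤ PySem.List.pyGetD alt s 0))).map (fun s => s + B)

-- ===== PRECONDITION & SPEC =====
-- A raises IndexError for every B < 0 (the outer range then reaches index len(A)),
-- so Pre_ admits exactly the nonnegative B.
def Pre_solve (A : List Int) (B : Int) : Prop := 0 ≤ B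
instance (A : List Int) (B : Int) : Decidable (Pre_solve A B) := by unfold Pre_solve; infer_instance
def pvWitness_solve : List Int × Int := ([0, 1, 0, 1], 1)

def Spec_solve (A : List Int) (B : Int) (out : List Int) : Prop := out = solve_alt A B
instance (A : List Int) (B : Int) (out : List Int) : Decidable (Spec_solve A B out) := by unfold Spec_solve; infer_instance

-- ===== CLAIM (what is proved, stated in full; the proofs are below) =====
def Claim_equal_solve : Prop := ∀ (A : List Int) (B : Int), Dom_solve A B → Pre_solve A B → Spec_solve A B (solve A B)

-- ===== LEMMAS AND PROOFS =====

theorem headI_eq_getD_zero (l : List Int) : l.headI = l.getD 0 0 := by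
  cases l <;> rfl

theorem buildAlt_pos (A : List Int) (s : Nat) (h : s < A.length) :
    1 ≤ (buildAlt A).getD s 0 := by
  induction A using buildAlt.induct generalizing s with
  | case1 => simp at h
  | case2 x =>
      cases s with
      | zero => simp [buildAlt]
      | succ m => simp at h
  | case3 a b rest ih =>
      cases s with
      | zero =>
          simp only [buildAlt, List.getD_cons_zero]
          split
          · have := ih 0 (by simp)
            rw [headI_eq_getD_zero]
            omega
          · omega
      | succ m =>
          simp only [buildAlt, List.getD_cons_succ]
          exact ih m (by simp at h ⊢; omega)

theorem buildAlt_step (A : List Int) (s : Nat) (h : s + 1 < A.length) :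
    (buildAlt A).getD s 0 =
      if A.getD (s+1) 0 = pyXor1 (A.getD s 0) then (buildAlt A).getD (s+1) 0 + 1 else 1 := by
  induction A using buildAlt.induct generalizing s with
  | case1 => simp at h
  | case2 x => simp at h
  | case3 a b rest ih =>
      cases s with
      | zero => simp [buildAlt, headI_eq_getD_zero]
      | succ m =>
          simp only [buildAlt, List.getD_cons_succ]
          exact ih m (by simp at h ⊢; omega)

theorem foldl_solveStep_false (A : List Int) (l : List Int) (e : Int) :
    l.foldl (solveStep A) (e, false) = (e, false) := by
  induction l with
  | nil => rfl
  | cons i t ih => simpa [solveStep] using ih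

theorem chain_lemma (A : List Int) (k s : Nat) (h : s + 1 + k ≤ A.length) :
    ((PySem.List.pyRange ((s : Int) + 1) ((s : Int) + 1 + (k : Int)) 1).foldl (solveStep A)
        (pyXor1 (A.getD s 0), true)).2
      = decide ((k : Int) + 1 ≤ (buildAlt A).getD s 0) := by
  induction k generalizing s with
  | zero =>
      rw [PySem.List.pyRange_one_eq_nil (by omega)]
      have := buildAlt_pos A s (by omega)
      simp only [List.foldl_nil]
      exact (decide_eq_true (by omega : (0:Nat) + 1 ≤ (buildAlt A).getD s 0)).symm
  | succ m ih =>
      have e2 : (s : Int) + 1 + ((m+1 : Nat) : Int) = (((s+1 : Nat)) : Int) + 1 + (m : Int) := by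
        push_cast; ring
      rw [e2, PySem.List.pyRange_one_cons (by push_cast; omega)]
      simp only [List.foldl_cons]
      have hs1 : s + 1 < A.length := by omega
      have hgd : PySem.List.pyGetD A ((s:Int)+1) 0 = A.getD (s+1) 0 := by
        rw [show ((s:Int)+1) = ((s+1 : Nat):Int) by push_cast; ring, PySem.List.pyGetD_natCast]
      have hstep := buildAlt_step A s hs1
      by_cases hc : A.getD (s+1) 0 = pyXor1 (A.getD s 0)
      · have step : solveStep A (pyXor1 (A.getD s 0), true) ((s:Int)+1)
            = (pyXor1 (A.getD (s+1) 0), true) := by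
          unfold solveStep
          rw [if_pos rfl, hgd,
            if_pos (show A.getD (s+1) 0 = (pyXor1 (A.getD s 0), true).1 from hc), hc]
        have e1 : ((s:Int)+1) + 1 = (((s+1 : Nat)) : Int) + 1 := by push_cast; ring
        rw [step, e1, ih (s+1) (by omega)]
        rw [hstep, if_pos hc]
        simp only [decide_eq_decide]
        push_cast
        omega
      · have step : solveStep A (pyXor1 (A.getD s 0), true) ((s:Int)+1)
            = (pyXor1 (A.getD s 0), false) := by
          unfold solveStep
          rw [if_pos rfl, hgd,
            if_neg (show ¬ A.getD (s+1) 0 = (pyXor1 (A.getD s 0), true).1 from hc)]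
        rw [step, foldl_solveStep_false]
        rw [hstep, if_neg hc]
        rw [eq_comm, decide_eq_false_iff_not]
        push_cast
        omega

theorem inner_eq (A : List Int) (s k : Nat) (h : s + (k + 1) ≤ A.length) :
    solveInner A (s : Int) ((k : Int) + 1)
      = decide ((k : Int) + 1 ≤ (buildAlt A).getD s 0) := by
  unfold solveInner
  rw [PySem.List.pyRange_one_cons (by omega)]
  simp only [List.foldl_cons]
  have step : solveStep A (PySem.List.pyGetD A (s:Int) 0, true) (s:Int)
      = (pyXor1 (PySem.List.pyGetD A (s:Int) 0), true) := by
    unfold solveStep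
    rw [if_pos rfl, if_pos rfl]
  rw [step, PySem.List.pyGetD_natCast,
    show (s:Int) + ((k:Int)+1) = (s:Int) + 1 + (k:Int) by ring,
    chain_lemma A k s (by omega)]

-- ===== VERDICT (by name: the statement is the Claim_ definition above) =====
theorem solve_spec : Claim_equal_solve := by
  unfold Claim_equal_solve
  intro A B _ hB
  unfold Spec_solve
  simp only [solve, solve_alt]
  rw [PySem.List.foldl_append_if, List.nil_append]
  refine congrArg _ (List.filter_congr ?_)
  intro s hs
  rw [PySem.List.mem_pyRange_one] at hs
  obtain ⟨hs0, hs1⟩ := hs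
  have hB' : (0:Int) ≤ B := hB
  obtain ⟨sN, rfl⟩ : ∃ sN : Nat, s = (sN : Int) := ⟨s.toNat, (Int.toNat_of_nonneg hs0).symm⟩
  obtain ⟨kN, hk⟩ : ∃ kN : Nat, 2*B+1 = (kN : Int) + 1 := ⟨(2*B).toNat, by omega⟩
  rw [hk, inner_eq A sN kN (by omega), PySem.List.pyGetD_natCast]
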